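-- pv_equiv track=rewrite | github.com/malfrine/two-cents | backend/core/apps/pennies/pennies/model/decision_periods.py | make_grouped_months_from_events
-- ===== SOURCE A (Python) =====
-- from typing import List, Dict, Tuple
--
-- def group_months(start: int, final: int, max_months: int) -> List[List[int]]:
--     months = list(range(start, final))
--     return [months[i : i + max_months] for i in range(0, len(months), max_months)]
--
-- def make_grouped_months_from_events(
--     sorted_events: List[Tuple[int, bool]], max_months: int
-- ) -> List[List[int]]:
--     grouped_months = []
--     for cur_event, next_event in zip(sorted_events, sorted_events[1:]):
--         cur_month, is_cur_withdrawal = cur_event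
--         next_month, _ = next_event
--         if is_cur_withdrawal:
--             grouped_months.append([cur_month])
--             cur_month += 1
--             grouped_months.extend(group_months(cur_month, next_month, max_months))
--         else:
--             grouped_months.extend(group_months(cur_month, next_month, max_months))
--
--     return grouped_months
-- ===== SOURCE B (Python) =====
-- from typing import List, Tuple
--
-- def make_grouped_months_from_events(
--     sorted_events: List[Tuple[int, bool]], max_months: int
-- ) -> List[List[int]]:
--     # Single linear pass with a running chunk buffer: months are appended one at
--     # a time and flushed when the buffer fills or an event boundary is reached;
--     # no per-interval range list is materialized and nothing is sliced.
--     chunks: List[List[int]] = []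
--     buf: List[int] = []
--     for (cur_month, is_withdrawal), (next_month, _) in zip(
--         sorted_events, sorted_events[1:]
--     ):
--         if is_withdrawal:
--             chunks.append([cur_month])
--             cur_month += 1
--         for m in range(cur_month, next_month):
--             buf.append(m)
--             if len(buf) == max_months:
--                 chunks.append(buf)
--                 buf = []
--         if buf:
--             chunks.append(buf)
--             buf = []
--     return chunks
-- ===== Notes on version B (the rewrite author's own statement) =====
-- stated objective: alternative
-- what changed: Replaces per-interval materialization of list(range(...)) plus index-stepped slicing with one linear pass that appends each month to a running chunk buffer, flushing when the buffer fills and force-flushing at every event boundary.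
-- outside the precondition, e.g. on make_grouped_months_from_events([(0, False), (3, False)], -1): A returns [], B returns [[0, 1, 2]]; on make_grouped_months_from_events([(0, False), (2, False)], 0): A raises ValueError, B returns [[0, 1]]
import Mathlib
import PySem

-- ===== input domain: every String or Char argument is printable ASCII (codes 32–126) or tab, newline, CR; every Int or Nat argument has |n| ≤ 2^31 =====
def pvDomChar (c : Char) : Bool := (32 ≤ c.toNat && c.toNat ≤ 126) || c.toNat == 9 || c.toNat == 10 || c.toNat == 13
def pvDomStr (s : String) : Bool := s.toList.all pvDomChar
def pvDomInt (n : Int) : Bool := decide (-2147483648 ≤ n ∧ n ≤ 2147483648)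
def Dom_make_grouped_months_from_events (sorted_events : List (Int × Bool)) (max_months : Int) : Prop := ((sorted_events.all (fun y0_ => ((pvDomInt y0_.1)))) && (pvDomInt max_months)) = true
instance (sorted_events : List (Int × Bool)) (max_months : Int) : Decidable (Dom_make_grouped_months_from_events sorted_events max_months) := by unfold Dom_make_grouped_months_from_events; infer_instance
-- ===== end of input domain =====

-- B replaces A's per-interval `list(range(...))` materialization + index-stepped slicing by a
-- single linear pass with a running chunk buffer (flush when full, force-flush at each event
-- boundary); same return value on Pre_ (positive chunk size, or fewer than two events).

-- ===== PORT A =====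
def group_months (start final max_months : Int) : List (List Int) :=
  let months := PySem.List.pyRange start final 1
  (PySem.List.pyRange 0 (months.length : Int) max_months).map
    (fun i => PySem.List.slice months (some i) (some (i + max_months)))

def make_grouped_months_from_events (sorted_events : List (Int × Bool)) (max_months : Int) : List (List Int) :=
  (List.zip sorted_events (PySem.List.slice sorted_events (some 1) none)).foldl
    (fun grouped_months pair =>
      let cur_month := pair.1.1
      let is_cur_withdrawal := pair.1.2
      let next_month := pair.2.1
      if is_cur_withdrawal then
        (grouped_months ++ [[cur_month]]) ++ group_months (cur_month + 1) next_month max_months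
      else
        grouped_months ++ group_months cur_month next_month max_months)
    []

-- ===== PORT B =====
def make_grouped_months_from_events_alt (sorted_events : List (Int × Bool)) (max_months : Int) : List (List Int) :=
  ((List.zip sorted_events (PySem.List.slice sorted_events (some 1) none)).foldl
    (fun st pair =>
      let cur_month := pair.1.1
      let st := if pair.1.2 then (st.1 ++ [[cur_month]], st.2) else st
      let cur_month := if pair.1.2 then cur_month + 1 else cur_month
      let st := (PySem.List.pyRange cur_month pair.2.1 1).foldl
        (fun st m =>
          let buf := st.2 ++ [m]
          if (buf.length : Int) = max_months then (st.1 ++ [buf], ([] : List Int)) else (st.1, buf))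
        st
      if st.2.isEmpty then st else (st.1 ++ [st.2], ([] : List Int)))
    ([], []) ).1

-- ===== PRECONDITION & SPEC =====
-- Pre_ restricts to the natural domain of a positive chunk size (whenever there are at least two
-- events, so that group_months is actually called): at max_months = 0 A raises ValueError, and for
-- negative max_months A's `range(0, len, step<0)` is empty so A silently drops every month, an
-- artefact of range's negative step; B chunks whole intervals there.
def Pre_make_grouped_months_from_events (sorted_events : List (Int × Bool)) (max_months : Int) : Prop :=
  sorted_events.length ≤ 1 ∨ 1 ≤ max_months
instance (sorted_events : List (Int × Bool)) (max_months : Int) : Decidable (Pre_make_grouped_months_from_events sorted_events max_months) := by unfold Pre_make_grouped_months_from_events; infer_instance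

def pvWitness_make_grouped_months_from_events : (List (Int × Bool)) × Int := ([(0, true), (3, false)], 2)

def Spec_make_grouped_months_from_events (sorted_events : List (Int × Bool)) (max_months : Int) (out : List (List Int)) : Prop := out = make_grouped_months_from_events_alt sorted_events max_months
instance (sorted_events : List (Int × Bool)) (max_months : Int) (out : List (List Int)) : Decidable (Spec_make_grouped_months_from_events sorted_events max_months out) := by unfold Spec_make_grouped_months_from_events; infer_instance

-- ===== CLAIM (what is proved, stated in full; the proofs are below) =====
def Claim_equal_make_grouped_months_from_events : Prop := ∀ (sorted_events : List (Int × Bool)) (max_months : Int), Dom_make_grouped_months_from_events sorted_events max_months → Pre_make_grouped_months_from_events sorted_events max_months → Spec_make_grouped_months_from_events sorted_events max_months (make_grouped_months_from_events sorted_events max_months)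

-- ===== LEMMAS AND PROOFS =====

-- reference chunking: split a list into consecutive chunks of size m (m >= 1 intended)
def chunksNat (m : Nat) : List Int → List (List Int)
  | [] => []
  | x :: xs => (x :: xs.take (m - 1)) :: chunksNat m (xs.drop (m - 1))
  termination_by l => l.length
  decreasing_by simp

theorem chunksNat_cons (m : Nat) (hm : 0 < m) (l : List Int) (hl : l ≠ []) :
    chunksNat m l = l.take m :: chunksNat m (l.drop m) := by
  cases l with
  | nil => exact absurd rfl hl
  | cons x xs =>
    obtain ⟨m', rfl⟩ : ∃ m', m = m' + 1 := ⟨m - 1, by omega⟩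
    simp [chunksNat]

theorem chunksNat_short (m : Nat) (l : List Int) (hl : l ≠ []) (h : l.length ≤ m) :
    chunksNat m l = [l] := by
  cases l with
  | nil => exact absurd rfl hl
  | cons x xs =>
    simp only [chunksNat]
    have h1 : xs.take (m - 1) = xs := List.take_of_length_le (by simp at h; omega)
    have h2 : xs.drop (m - 1) = [] := List.drop_eq_nil_of_le (by simp at h; omega)
    simp [h1, h2, chunksNat]

theorem pyRange_pos_shift (a b s : Int) (hs : 0 < s) :
    PySem.List.pyRange a b s = (PySem.List.pyRange 0 (b - a) s).map (a + ·) := by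
  rw [PySem.List.pyRange_of_pos _ _ hs, PySem.List.pyRange_of_pos _ _ hs]
  simp only [List.map_map]
  have hc : (if (0:Int) < b - a then ((b - a - 0 + s - 1) / s).toNat else 0)
      = (if a < b then ((b - a + s - 1) / s).toNat else 0) := by
    have e : b - a - 0 + s - 1 = b - a + s - 1 := by ring
    rw [e]
    split_ifs with h1 h2
    · rfl
    · omega
    · omega
    · rfl
  rw [hc]
  exact (List.map_congr_left fun k _ => by simp).symm

theorem pyRange_pos_nil (a b s : Int) (hs : 0 < s) (h : b ≤ a) :
    PySem.List.pyRange a b s = [] := by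
  rw [PySem.List.pyRange_of_pos _ _ hs]
  simp [show ¬ a < b by omega]

theorem pyRange_pos_cons (a b s : Int) (hs : 0 < s) (h : a < b) :
    PySem.List.pyRange a b s = a :: PySem.List.pyRange (a + s) b s := by
  rw [PySem.List.pyRange_of_pos _ _ hs, PySem.List.pyRange_of_pos _ _ hs]
  have hcount : (if a < b then ((b - a + s - 1) / s).toNat else 0) =
      (if a + s < b then ((b - (a + s) + s - 1) / s).toNat else 0) + 1 := by
    rw [if_pos h]
    split_ifs with h2
    · have e1 : b - a + s - 1 = (b - (a + s) + s - 1) + 1 * s := by ring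
      rw [e1, Int.add_mul_ediv_right _ _ (by omega : s ≠ 0)]
      have : 0 ≤ (b - (a + s) + s - 1) / s := Int.ediv_nonneg (by omega) (by omega)
      omega
    · have h1 : 1 ≤ (b - a + s - 1) / s := (Int.le_ediv_iff_mul_le hs).mpr (by omega)
      have h2' : (b - a + s - 1) / s < 2 := (Int.ediv_lt_iff_lt_mul hs).mpr (by omega)
      omega
  rw [hcount, List.range_succ_eq_map]
  simp only [List.map_cons, List.map_map]
  congr 1
  · simp
  · exact List.map_congr_left fun k _ => by simp [Nat.succ_eq_add_one]; ring

-- A's comprehension of slices over range(0, len, m) is exactly chunksNat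
theorem slices_eq_chunksNat (l : List Int) (m : Nat) (hm : 0 < m) :
    (PySem.List.pyRange 0 (l.length : Int) (m : Int)).map
      (fun i => PySem.List.slice l (some i) (some (i + (m : Int)))) = chunksNat m l := by
  induction hn : l.length using Nat.strong_induction_on generalizing l with
  | _ n ih =>
  subst hn
  cases l with
  | nil =>
    simp only [List.length_nil, Nat.cast_zero]
    rw [pyRange_pos_nil 0 0 (m : Int) (by exact_mod_cast hm) le_rfl]
    simp [chunksNat]
  | cons x xs =>
    have hm' : (0 : Int) < (m : Int) := by exact_mod_cast hm
    have hlen : (0 : Int) < (((x :: xs).length : Nat) : Int) := by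
      simp only [List.length_cons]; omega
    rw [pyRange_pos_cons _ _ _ hm' hlen]
    rw [chunksNat_cons m hm _ (by simp)]
    simp only [List.map_cons, zero_add]
    congr 1
    · rw [PySem.List.slice_toNat _ le_rfl (by positivity)]
      simp
    · -- tail: shift the range and re-express each slice over the dropped list
      rw [pyRange_pos_shift _ _ _ hm', List.map_map]
      by_cases hle : (x :: xs).length ≤ m
      · -- one chunk only: both tails are empty
        have h1 : PySem.List.pyRange 0 ((((x :: xs).length : Nat) : Int) - (m : Int)) (m : Int) = [] :=
          pyRange_pos_nil _ _ _ hm' (by omega)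
        have h2 : (x :: xs).drop m = [] := List.drop_eq_nil_of_le hle
        rw [h1, h2]
        simp [chunksNat]
      · rw [not_le] at hle
        have hIH := ih ((x :: xs).drop m).length (by simp; omega) ((x :: xs).drop m) rfl
        rw [← hIH]
        have hlen2 : ((((x :: xs).drop m).length : Nat) : Int)
            = (((x :: xs).length : Nat) : Int) - (m : Int) := by
          rw [List.length_drop]; omega
        rw [← hlen2]
        apply List.map_congr_left
        intro i hi
        have hi0 : 0 ≤ i := by
          have := (PySem.List.mem_pyRange_iff_of_pos hm' i).mp hi
          omega
        simp only [Function.comp_apply]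
        rw [PySem.List.slice_toNat _ (by omega) (by omega),
            PySem.List.slice_toNat _ hi0 (by omega),
            List.drop_drop]
        have e1 : ((m : Int) + i).toNat = m + i.toNat := by omega
        have e2 : ((m : Int) + i + (m : Int)).toNat - ((m : Int) + i).toNat
            = (i + (m : Int)).toNat - i.toNat := by omega
        rw [e1]
        congr 1
        omega

-- B's inner buffered loop, flushed at the end, produces exactly the chunks of buf ++ months
theorem buf_loop (mI : Int) (m : Nat) (hm : 0 < m) (hmI : mI = (m : Int)) :
    ∀ (months : List Int) (acc : List (List Int)) (buf : List Int), buf.length < m →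
    (let st := months.foldl
        (fun st mo =>
          let b := st.2 ++ [mo]
          if (b.length : Int) = mI then (st.1 ++ [b], ([] : List Int)) else (st.1, b))
        (acc, buf)
     if st.2.isEmpty then st else (st.1 ++ [st.2], ([] : List Int)))
    = (acc ++ chunksNat m (buf ++ months), []) := by
  intro months
  induction months with
  | nil =>
    intro acc buf hbuf
    by_cases hb : buf = []
    · subst hb
      simp [chunksNat]
    · rw [List.append_nil, chunksNat_short m buf hb (by omega)]
      simp [List.isEmpty_iff, hb]
  | cons mo rest ih =>
    intro acc buf hbuf
    simp only [List.foldl_cons]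
    by_cases hfull : (((buf ++ [mo]).length : Nat) : Int) = mI
    · rw [if_pos hfull]
      have hfl : buf.length + 1 = m := by
        rw [hmI] at hfull
        have h2 : (((buf ++ [mo]).length : Nat) : Int) = ((m : Nat) : Int) := hfull
        simp at h2
        omega
      have hrec := ih (acc ++ [buf ++ [mo]]) [] (by simp; omega)
      simp only [List.nil_append] at hrec
      have hch : chunksNat m (buf ++ mo :: rest) = (buf ++ [mo]) :: chunksNat m rest := by
        rw [show buf ++ mo :: rest = (buf ++ [mo]) ++ rest by simp]
        rw [chunksNat_cons m hm ((buf ++ [mo]) ++ rest) (by simp)]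
        rw [List.take_append_of_le_length (by simp; omega),
            List.take_of_length_le (by simp; omega)]
        rw [List.drop_append_of_le_length (by simp; omega)]
        rw [List.drop_eq_nil_of_le (by simp; omega)]
        simp
      rw [hrec, hch]
      simp
    · rw [if_neg hfull]
      have hfl : buf.length + 1 ≠ m := by
        rw [hmI] at hfull
        intro h
        exact hfull (by simp; omega)
      have hrec := ih acc (buf ++ [mo]) (by simp; omega)
      rw [hrec]
      simp

-- per-interval equality: A's group_months = B's buffered pass from an empty buffer
theorem interval_eq (c n mI : Int) (m : Nat) (hm : 0 < m) (hmI : mI = (m : Int))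
    (acc : List (List Int)) :
    (let st := (PySem.List.pyRange c n 1).foldl
        (fun st mo =>
          let b := st.2 ++ [mo]
          if (b.length : Int) = mI then (st.1 ++ [b], ([] : List Int)) else (st.1, b))
        (acc, ([] : List Int))
     if st.2.isEmpty then st else (st.1 ++ [st.2], ([] : List Int)))
    = (acc ++ group_months c n mI, []) := by
  rw [buf_loop mI m hm hmI (PySem.List.pyRange c n 1) acc [] (by simpa)]
  simp only [List.nil_append, group_months, hmI, slices_eq_chunksNat _ m hm]

-- top-level fold: B's state keeps an empty buffer at every event boundary
theorem fold_eq (mI : Int) (m : Nat) (hm : 0 < m) (hmI : mI = (m : Int))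
    (pairs : List ((Int × Bool) × (Int × Bool))) :
    ∀ (acc : List (List Int)),
    pairs.foldl
      (fun st pair =>
        let cur_month := pair.1.1
        let st := if pair.1.2 then (st.1 ++ [[cur_month]], st.2) else st
        let cur_month := if pair.1.2 then cur_month + 1 else cur_month
        let st := (PySem.List.pyRange cur_month pair.2.1 1).foldl
          (fun st mo =>
            let b := st.2 ++ [mo]
            if (b.length : Int) = mI then (st.1 ++ [b], ([] : List Int)) else (st.1, b))
          st
        if st.2.isEmpty then st else (st.1 ++ [st.2], ([] : List Int)))
      (acc, ([] : List Int))
    = (pairs.foldl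
        (fun grouped_months pair =>
          let cur_month := pair.1.1
          let is_cur_withdrawal := pair.1.2
          let next_month := pair.2.1
          if is_cur_withdrawal then
            (grouped_months ++ [[cur_month]]) ++ group_months (cur_month + 1) next_month mI
          else
            grouped_months ++ group_months cur_month next_month mI)
        acc, []) := by
  induction pairs with
  | nil => intro acc; simp
  | cons p rest ih =>
    intro acc
    simp only [List.foldl_cons]
    cases hw : p.1.2
    · simp only [Bool.false_eq_true, if_false]
      rw [interval_eq p.1.1 p.2.1 mI m hm hmI acc]
      exact ih _
    · simp only [if_true]
      rw [interval_eq (p.1.1 + 1) p.2.1 mI m hm hmI (acc ++ [[p.1.1]])]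
      exact ih _

theorem zip_tail_short (l : List (Int × Bool)) (h : l.length ≤ 1) :
    List.zip l (PySem.List.slice l (some 1) none) = [] := by
  rw [PySem.List.slice_from_one]
  cases l with
  | nil => simp
  | cons x xs =>
    cases xs with
    | nil => simp
    | cons y ys => simp at h

-- ===== VERDICT (by name: the statement is the Claim_ definition above) =====
theorem make_grouped_months_from_events_spec : Claim_equal_make_grouped_months_from_events := by
  intro sorted_events max_months _hdom hpre
  unfold Spec_make_grouped_months_from_events
  unfold make_grouped_months_from_events make_grouped_months_from_events_alt
  rcases hpre with hshort | hpos
  · rw [zip_tail_short _ hshort]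
    simp
  · obtain ⟨m, hm, hmI⟩ : ∃ m : Nat, 0 < m ∧ max_months = (m : Int) :=
      ⟨max_months.toNat, by omega, by omega⟩
    rw [fold_eq max_months m hm hmI]
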